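-- pv_equiv track=rewrite | github.com/raresrosca/CtCI | leetcodes/trapping_rain_water.py | count_water_2
-- ===== SOURCE A (Python) =====
-- def count_water_2(mat):
--     counter = 0
--     for i in range(len(mat)):
--         temp = 0
--         toggle = False
--         for j in range(len(mat[0])):
--             if mat[i][j] == 1 and toggle == False:
--                 toggle = True
--             elif mat[i][j] == 1 and toggle == True:
--                 counter += temp
--                 temp = 0
--             elif mat[i][j] == 0 and toggle == True:
--                 temp += 1
--     return counter
-- ===== SOURCE B (Python) =====
-- def count_water_2(mat):
--     if not mat:
--         return 0
--     w = len(mat[0])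
--     total = 0
--     for row in mat:
--         vals = [row[j] for j in range(w)]
--         if 1 in vals:
--             first = vals.index(1)
--             last = w - 1 - vals[::-1].index(1)
--             total += vals[first + 1:last].count(0)
--     return total
-- ===== Notes on version B (the rewrite author's own statement) =====
-- stated objective: alternative
-- what changed: Replaces the toggle/temp state machine with a per-row boundary decomposition: find the first and last index of a 1 and count the zeros strictly between them.
import Mathlib
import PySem

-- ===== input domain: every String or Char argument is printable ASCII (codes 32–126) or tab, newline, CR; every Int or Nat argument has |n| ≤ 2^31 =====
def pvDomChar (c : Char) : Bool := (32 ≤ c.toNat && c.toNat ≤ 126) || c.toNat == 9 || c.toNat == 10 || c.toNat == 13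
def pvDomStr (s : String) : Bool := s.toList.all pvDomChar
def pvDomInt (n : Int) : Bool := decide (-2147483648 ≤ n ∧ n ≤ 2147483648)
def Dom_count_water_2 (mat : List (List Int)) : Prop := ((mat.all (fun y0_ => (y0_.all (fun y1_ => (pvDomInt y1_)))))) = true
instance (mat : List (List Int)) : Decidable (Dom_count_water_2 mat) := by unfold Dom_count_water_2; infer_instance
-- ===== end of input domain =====

-- B replaces A's toggle/temp state machine with a per-row boundary decomposition
-- (first/last index of 1, count zeros strictly between them); same cost, alternative algorithm.


-- ===== PORT A =====
-- one step of A's inner loop on the value v = mat[i][j]; state is (counter, temp, toggle)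
def pvStepA (s : Int × Int × Bool) (v : Int) : Int × Int × Bool :=
  if v = 1 ∧ s.2.2 = false then (s.1, s.2.1, true)
  else if v = 1 ∧ s.2.2 = true then (s.1 + s.2.1, 0, true)
  else if v = 0 ∧ s.2.2 = true then (s.1, s.2.1 + 1, true)
  else s

def count_water_2 (mat : List (List Int)) : Int :=
  (List.range mat.length).foldl (fun counter i =>
    ((List.range (mat.headD []).length).foldl
      (fun s j => pvStepA s ((mat.getD i []).getD j 0)) (counter, 0, false)).1) 0

-- ===== PORT B =====
def count_water_2_alt (mat : List (List Int)) : Int :=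
  match mat with
  | [] => 0
  | r0 :: _ =>
    let w := r0.length
    mat.foldl (fun total row =>
      let vals := (List.range w).map (fun j => row.getD j 0)
      if vals.contains 1 then
        let first := (PySem.List.index? vals 1).getD 0
        let last : Int := (w : Int) - 1 - ((PySem.List.index? vals.reverse 1).getD 0 : Int)
        total + (PySem.List.count (PySem.List.slice vals (some ((first : Int) + 1)) (some last)) 0 : Int)
      else total) 0

-- ===== PRECONDITION & SPEC =====
-- Pre_ excludes exactly the jagged matrices (some row shorter than row 0), on which Python A
-- (and Python B alike) raises IndexError.
def Pre_count_water_2 (mat : List (List Int)) : Prop :=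
  ∀ row ∈ mat, (mat.headD []).length ≤ row.length
instance (mat : List (List Int)) : Decidable (Pre_count_water_2 mat) := by
  unfold Pre_count_water_2; infer_instance
def pvWitness_count_water_2 : List (List Int) := [[0, 1, 0, 1], [1, 0, 2, 1, 5]]

def Spec_count_water_2 (mat : List (List Int)) (out : Int) : Prop := out = count_water_2_alt mat
instance (mat : List (List Int)) (out : Int) : Decidable (Spec_count_water_2 mat out) := by unfold Spec_count_water_2; infer_instance

-- ===== CLAIM (what is proved, stated in full; the proofs are below) =====
def Claim_equal_count_water_2 : Prop := ∀ (mat : List (List Int)), Dom_count_water_2 mat → Pre_count_water_2 mat → Spec_count_water_2 mat (count_water_2 mat)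

-- ===== LEMMAS AND PROOFS =====

-- counter increment produced by A's inner loop from state (·, t, true)
def pvG : List Int → Int → Int
  | [], _ => 0
  | x :: l, t => if x = 1 then t + pvG l 0 else if x = 0 then pvG l (t + 1) else pvG l t

-- counter increment produced by A's inner loop from state (·, t, false)
def pvH : List Int → Int → Int
  | [], _ => 0
  | x :: l, t => if x = 1 then pvG l t else pvH l t

theorem pvFoldA_true (l : List Int) : ∀ c t,
    (l.foldl pvStepA (c, t, true)).1 = c + pvG l t := by
  induction l with
  | nil => intro c t; simp [pvG]
  | cons x l ih =>
    intro c t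
    by_cases hx : x = 1
    · simp [pvStepA, pvG, hx, ih]; ring
    · by_cases hx0 : x = 0
      · simp [pvStepA, pvG, hx, hx0, ih]
      · simp [pvStepA, pvG, hx, hx0, ih]

theorem pvFoldA_false (l : List Int) : ∀ c t,
    (l.foldl pvStepA (c, t, false)).1 = c + pvH l t := by
  induction l with
  | nil => intro c t; simp [pvH]
  | cons x l ih =>
    intro c t
    by_cases hx : x = 1
    · simp [pvStepA, pvH, hx, pvFoldA_true]
    · by_cases hx0 : x = 0
      · simp [pvStepA, pvH, hx, hx0, ih]
      · simp [pvStepA, pvH, hx, hx0, ih]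

theorem pvG_no_one (l : List Int) (h : 1 ∉ l) : ∀ t, pvG l t = 0 := by
  induction l with
  | nil => intro t; simp [pvG]
  | cons x l ih =>
    intro t
    have hx : x ≠ 1 := fun he => h (by simp [he])
    have hl : 1 ∉ l := fun hm => h (List.mem_cons_of_mem _ hm)
    by_cases hx0 : x = 0 <;> simp [pvG, hx, hx0, ih hl]

theorem pvH_no_one (l : List Int) (h : 1 ∉ l) : ∀ t, pvH l t = 0 := by
  induction l with
  | nil => intro t; simp [pvH]
  | cons x l ih =>
    intro t
    have hx : x ≠ 1 := fun he => h (by simp [he])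
    have hl : 1 ∉ l := fun hm => h (List.mem_cons_of_mem _ hm)
    simp [pvH, hx, ih hl]

theorem pvG_flush (m : List Int) (q : List Int) (hq : 1 ∉ q) : ∀ t,
    pvG (m ++ 1 :: q) t = t + (m.count 0 : Int) := by
  induction m with
  | nil =>
    intro t
    simp [pvG, pvG_no_one q hq]
  | cons x m ih =>
    intro t
    by_cases hx : x = 1
    · simp [pvG, hx, ih, List.count_cons]
    · by_cases hx0 : x = 0
      · simp [pvG, hx, hx0, ih, List.count_cons]; ring
      · simp [pvG, hx, hx0, ih, List.count_cons]

theorem pvH_first (p : List Int) (s : List Int) (hp : 1 ∉ p) : ∀ t,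
    pvH (p ++ 1 :: s) t = pvG s t := by
  induction p with
  | nil => intro t; simp [pvH]
  | cons x p ih =>
    intro t
    have hx : x ≠ 1 := fun he => hp (by simp [he])
    have hp' : 1 ∉ p := fun hm => hp (List.mem_cons_of_mem _ hm)
    simp [pvH, hx, ih hp']

-- B's per-row contribution equals pvH vals 0
theorem pvRow_eq (vals : List Int) :
    (if vals.contains 1 then
      (PySem.List.count (PySem.List.slice vals
        (some (((PySem.List.index? vals 1).getD 0 : Int) + 1))
        (some ((vals.length : Int) - 1 - ((PySem.List.index? vals.reverse 1).getD 0 : Int)))) 0 : Int)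
     else 0) = pvH vals 0 := by
  by_cases hmem : 1 ∈ vals
  · obtain ⟨k, hk⟩ := (PySem.List.index?_isSome_iff (xs := vals) (v := 1)).2 hmem |> Option.isSome_iff_exists.1
    obtain ⟨p, s, hps, hplen, hpnot⟩ := (PySem.List.index?_eq_some_iff _ _ _).1 hk
    by_cases hs : 1 ∈ s
    · -- s = m ++ 1 :: q with 1 ∉ q (last occurrence)
      obtain ⟨q', m', hsplit, _, hq'not⟩ :=
        (PySem.List.index?_eq_some_iff _ _ _).1 (Option.eq_some_of_isSome
          ((PySem.List.index?_isSome_iff (xs := s.reverse) (v := 1)).2 (by simpa using hs)))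
      -- s.reverse = q' ++ 1 :: m'  so  s = m'.reverse ++ 1 :: q'.reverse
      have hsdec : s = m'.reverse ++ 1 :: q'.reverse := by
        have := congrArg List.reverse hsplit
        simpa using this
      have hqnot : (1 : Int) ∉ q'.reverse := by
        intro h; exact hq'not (by simpa using h)
      have hrev : PySem.List.index? vals.reverse 1 = some q'.length := by
        apply (PySem.List.index?_eq_some_iff _ _ _).2
        refine ⟨q'.reverse.reverse, (p ++ 1 :: m'.reverse).reverse, ?_, by simp, by simpa using hqnot⟩
        rw [hps, hsdec]
        simp
      have hlen : vals.length = p.length + 1 + m'.reverse.length + 1 + q'.length := by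
        rw [hps, hsdec]; simp; omega
      have hcast : (vals.length : Int) - 1 - (q'.length : Int)
          = ((p.length + 1 + m'.reverse.length : Nat) : Int) := by
        rw [hlen]; push_cast; ring
      rw [if_pos (by simpa using hmem), hk, hrev]
      simp only [Option.getD_some, hcast]
      rw [← hplen]
      have hslice : PySem.List.slice vals (some ((p.length : Int) + 1))
          (some ((p.length + 1 + m'.reverse.length : Nat) : Int)) = m'.reverse := by
        have h1 : ((p.length : Int) + 1) = ((p.length + 1 : Nat) : Int) := by push_cast; ring
        rw [h1, PySem.List.slice_natCast, hps, hsdec]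
        rw [show p ++ 1 :: (m'.reverse ++ 1 :: q'.reverse)
              = (p ++ [1]) ++ (m'.reverse ++ 1 :: q'.reverse) by simp]
        rw [List.drop_append_of_le_length (by simp)]
        simp [List.take_append_of_le_length]
      rw [hslice, hps, hsdec, pvH_first p _ hpnot, pvG_flush _ _ hqnot]
      simp [PySem.List.count]
    · -- single block: last 1 is the first 1; slice is empty
      have hsrev : (1 : Int) ∉ s.reverse := by simpa using hs
      have hrev : PySem.List.index? vals.reverse 1 = some s.length := by
        apply (PySem.List.index?_eq_some_iff _ _ _).2
        refine ⟨s.reverse, p.reverse, ?_, by simp, hsrev⟩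
        rw [hps]; simp
      have hlen : vals.length = p.length + 1 + s.length := by rw [hps]; simp; omega
      have hcast : (vals.length : Int) - 1 - (s.length : Int) = ((p.length : Nat) : Int) := by
        rw [hlen]; push_cast; ring
      rw [if_pos (by simpa using hmem), hk, hrev]
      simp only [Option.getD_some, hcast]
      rw [← hplen]
      have h1 : ((p.length : Int) + 1) = ((p.length + 1 : Nat) : Int) := by push_cast; ring
      rw [h1, PySem.List.slice_natCast]
      simp [PySem.List.count, hps, pvH_first p s hpnot, pvG_no_one s hs]
  · rw [if_neg (by simpa using hmem), pvH_no_one vals hmem]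

-- fold over indices of l equals fold over l
theorem pvFold_range_getD {α β : Type} (l : List α) (d : α) (f : β → α → β) : ∀ b,
    (List.range l.length).foldl (fun b i => f b (l.getD i d)) b = l.foldl f b := by
  induction l with
  | nil => intro b; simp
  | cons x l ih =>
    intro b
    rw [List.length_cons, List.range_succ_eq_map]
    simp only [List.foldl_cons, List.foldl_map, List.getD_cons_zero, List.getD_cons_succ]
    exact ih (f b x)

theorem pvA_eq_sum (mat : List (List Int)) (w : Nat) : ∀ c,
    (List.range mat.length).foldl (fun counter i =>
      ((List.range w).foldl
        (fun s j => pvStepA s ((mat.getD i []).getD j 0)) (counter, 0, false)).1) c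
    = mat.foldl (fun counter row =>
        counter + pvH ((List.range w).map (fun j => row.getD j 0)) 0) c := by
  have h := pvFold_range_getD mat [] (fun counter row =>
    ((List.range w).foldl (fun s j => pvStepA s (row.getD j 0)) (counter, 0, false)).1)
  intro c
  rw [h c]
  apply PySem.List.foldl_congr_mem
  intro b row _hmemrow
  have : (List.range w).foldl (fun s j => pvStepA s (row.getD j 0)) (b, 0, false)
      = ((List.range w).map (fun j => row.getD j 0)).foldl pvStepA (b, 0, false) := by
    rw [List.foldl_map]
  rw [this, pvFoldA_false]

-- ===== VERDICT (by name: the statement is the Claim_ definition above) =====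
theorem count_water_2_spec : Claim_equal_count_water_2 := by
  intro mat _ _
  unfold Spec_count_water_2 count_water_2 count_water_2_alt
  cases mat with
  | nil => simp
  | cons r0 rest =>
    rw [pvA_eq_sum]
    simp only [List.headD_cons]
    apply PySem.List.foldl_congr_mem
    intro b row _hmemrow
    rw [← pvRow_eq ((List.range r0.length).map (fun j => row.getD j 0))]
    simp only [List.length_map, List.length_range]
    split_ifs <;> ring
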